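-- pv_equiv track=rewrite | github.com/Syeosle/2023RnE_Python | 22085 SYL/syllables.py | bestTranslate
-- ===== SOURCE A (Python) =====
-- import string as st
--
-- EXCEPTION_ENG = {'cafe': 2}
--
-- VOWEL_ENG = 'aeiouy'
--
-- def syllEng(string):  # 글자만 남은 lowercase 단어 -> syllables
--     if string in EXCEPTION_ENG: return EXCEPTION_ENG[string]
--     cnt = 0
--     string = ' ' + string
--     for i in range(1, len(string)):
--         if string[i-1] not in VOWEL_ENG and string[i] in VOWEL_ENG: cnt += 1
--     if string[-1] == 'e' and string[-2] not in 'l' + VOWEL_ENG: cnt -= 1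
--     return cnt
--
-- def syllRom(string):  # 글자만 남은 lowercase 단어 -> syllables
--     cnt = 0
--     string = ' ' + string
--     for i in range(1, len(string)):
--         if string[i-1] not in VOWEL_ENG and string[i] in VOWEL_ENG: cnt += 1
--     return cnt
--
-- def splitPoints(string, isRoman=False):  # 글자만 남은 lowercase 문장 -> 띄어 쓰기의 음절 위치 (마지막은 총 음절)
--     words = string.split()
--     L = []  # result
--     for word in words:
--         if word.encode().isalpha():
--             if isRoman: L.append(syllRom(word))
--             else: L.append(syllEng(word))
--         else: L.append(len(word))
--
--     for i in range(1, len(L)):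
--         L[i] += L[i-1]
--     return L
--
-- def onlyLower(string):
--     for i in st.punctuation: string = string.replace(i, '')
--     string = string.lower()
--     return string
--
-- def bestTranslate(strings, original, isRoman=False):  # 번역문, 원문 -> 제일 맞는 문장
--     # strings: list of translated sentences ordered by probability
--     strings_keep = [i for i in strings]
--     for i in range(len(strings)):
--         strings[i] = onlyLower(strings[i])
--     original = onlyLower(original)
--
--     info_str = [(splitPoints(strings[i], isRoman), i) for i in range(len(strings))]
--     info_original = splitPoints(original, isRoman)
--
--     # filter 1: by length
--     info_str.sort(key=lambda x: abs(x[0][-1] - info_original[-1]))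
--     for i in range(len(info_str)):
--         if info_str[i][0][-1] != info_str[0][0][-1]:
--             info_str = info_str[:i]
--             break
--
--     # filter 2: by fit
--     score = [0] * len(info_str)
--     for i in info_original:
--         for j in range(len(info_str)):
--             if i in info_str[j][0]: score[j] += 1
--
--     return strings_keep[info_str[score.index(max(score))][1]]
-- ===== SOURCE B (Python) =====
-- # Same syllable helpers as the original; bestTranslate replaces the sort-then-truncate
-- # of filter 1 by a single min/collect pass and filter 2's score table by one argmax pass.
-- # Like the original, it rewrites the entries of `strings` in place (onlyLower).
-- import string as st
--
-- EXCEPTION_ENG = {'cafe': 2}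
--
-- VOWEL_ENG = 'aeiouy'
--
-- def syllEng(string):
--     if string in EXCEPTION_ENG: return EXCEPTION_ENG[string]
--     cnt = 0
--     string = ' ' + string
--     for i in range(1, len(string)):
--         if string[i-1] not in VOWEL_ENG and string[i] in VOWEL_ENG: cnt += 1
--     if string[-1] == 'e' and string[-2] not in 'l' + VOWEL_ENG: cnt -= 1
--     return cnt
--
-- def syllRom(string):
--     cnt = 0
--     string = ' ' + string
--     for i in range(1, len(string)):
--         if string[i-1] not in VOWEL_ENG and string[i] in VOWEL_ENG: cnt += 1
--     return cnt
--
-- def splitPoints(string, isRoman=False):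
--     words = string.split()
--     L = []
--     for word in words:
--         if word.encode().isalpha():
--             if isRoman: L.append(syllRom(word))
--             else: L.append(syllEng(word))
--         else: L.append(len(word))
--     for i in range(1, len(L)):
--         L[i] += L[i-1]
--     return L
--
-- def onlyLower(string):
--     for i in st.punctuation: string = string.replace(i, '')
--     string = string.lower()
--     return string
--
-- def bestTranslate(strings, original, isRoman=False):
--     strings_keep = [i for i in strings]
--     for i in range(len(strings)):
--         strings[i] = onlyLower(strings[i])
--     original = onlyLower(original)
--
--     pts = [splitPoints(s, isRoman) for s in strings]
--     opts = splitPoints(original, isRoman)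
--     ot = opts[-1]
--
--     # filter 1, no sort: minimal |total - ot|; the target total is the first such
--     # candidate's total; survivors = leading run of that tier sharing the target total
--     dstar = min(abs(p[-1] - ot) for p in pts)
--     tier = [(p, i) for i, p in enumerate(pts) if abs(p[-1] - ot) == dstar]
--     target = tier[0][0][-1]
--     survivors = []
--     for p, i in tier:
--         if p[-1] != target:
--             break
--         survivors.append((p, i))
--
--     # filter 2 as one argmax pass (first maximum wins)
--     best_p, best_i = survivors[0]
--     best = sum(1 for x in opts if x in best_p)
--     for p, i in survivors[1:]:
--         s = sum(1 for x in opts if x in p)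
--         if s > best:
--             best, best_i = s, i
--     return strings_keep[best_i]
-- ===== Notes on version B (the rewrite author's own statement) =====
-- stated objective: alternative
-- what changed: filter 1's stable sort + truncate-at-first-differing-total is replaced by a single min pass (minimal |total - original total|, the first such candidate's total becoming the target, then a take-while over that tier in input order), and filter 2's score table plus score.index(max(score)) by one first-argmax fold over the survivors
import Mathlib
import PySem

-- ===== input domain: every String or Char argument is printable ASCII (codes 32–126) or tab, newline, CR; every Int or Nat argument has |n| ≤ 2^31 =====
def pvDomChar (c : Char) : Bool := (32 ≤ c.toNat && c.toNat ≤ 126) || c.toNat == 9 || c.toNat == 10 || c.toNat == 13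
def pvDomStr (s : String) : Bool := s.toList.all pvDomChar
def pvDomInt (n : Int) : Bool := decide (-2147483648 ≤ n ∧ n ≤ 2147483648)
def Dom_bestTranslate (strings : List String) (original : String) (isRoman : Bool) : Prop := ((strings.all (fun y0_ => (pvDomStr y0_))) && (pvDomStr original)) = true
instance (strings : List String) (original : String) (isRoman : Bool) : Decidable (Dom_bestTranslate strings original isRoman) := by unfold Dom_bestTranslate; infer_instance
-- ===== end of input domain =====

-- B replaces filter 1's sort-then-truncate by a single min/collect pass and filter 2's
-- score table + score.index(max(score)) by one first-argmax fold (same return value;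
-- like A, the Python B rewrites the entries of `strings` in place — return value only is proved).


-- ===== PORT A =====
-- helpers shared verbatim by both Pythons (Source A and Source B define the same four helpers)
def pvPunct : List Char := "!\"#$%&'()*+,-./:;<=>?@[\\]^_`{|}~".toList

def pvVowels : List Char := ['a', 'e', 'i', 'o', 'u', 'y']

def pvExcEng : PySem.Dict String Int := PySem.Dict.ofList [("cafe", 2)]

def pvOnlyLower (s : String) : String :=
  PySem.Str.lower (pvPunct.foldl (fun acc c => PySem.Str.replace acc (String.ofList [c]) "") s)

def pvSyllEng (s : String) : Int :=
  if pvExcEng.contains s then pvExcEng.getD s 0 else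
  let t : List Char := ' ' :: s.toList   -- string = ' ' + string
  let cnt : Int := (PySem.List.pyRange 1 (t.length : Int) 1).foldl
    (fun cnt i =>
      if !(pvVowels.contains (PySem.List.pyGetD t (i - 1) ' ')) &&
          pvVowels.contains (PySem.List.pyGetD t i ' ')
      then cnt + 1 else cnt) 0
  if PySem.List.pyGetD t (-1) ' ' == 'e' &&
      !(('l' :: pvVowels).contains (PySem.List.pyGetD t (-2) ' '))
  then cnt - 1 else cnt

def pvSyllRom (s : String) : Int :=
  let t : List Char := ' ' :: s.toList
  (PySem.List.pyRange 1 (t.length : Int) 1).foldl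
    (fun cnt i =>
      if !(pvVowels.contains (PySem.List.pyGetD t (i - 1) ' ')) &&
          pvVowels.contains (PySem.List.pyGetD t i ' ')
      then cnt + 1 else cnt) 0

-- `word.encode().isalpha()` equals strIsalpha on the printable-ASCII domain
def pvSplitPoints (s : String) (isRoman : Bool) : List Int :=
  let words := PySem.Str.split₀ s
  let L : List Int := words.foldl (fun L w =>
    L ++ [if PySem.Str.strIsalpha w then (if isRoman then pvSyllRom w else pvSyllEng w)
          else (PySem.Str.len w : Int)]) []
  (PySem.List.pyRange 1 (L.length : Int) 1).foldl
    (fun L i => PySem.List.pySetD L i (PySem.List.pyGetD L i 0 + PySem.List.pyGetD L (i - 1) 0)) L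

def bestTranslate (strings : List String) (original : String) (isRoman : Bool) : String :=
  let keep := strings
  let strs := strings.map pvOnlyLower
  let orig := pvOnlyLower original
  let infoStr := (PySem.List.enumerate strs 0).map (fun p => (pvSplitPoints p.2 isRoman, p.1))
  let infoOrig := pvSplitPoints orig isRoman
  let ot := PySem.List.pyGetD infoOrig (-1) 0
  -- filter 1: stable sort by abs(total - ot), truncate at the first differing total
  let s := PySem.List.sorted infoStr (fun x => |PySem.List.pyGetD x.1 (-1) 0 - ot|) false
  let t0 := PySem.List.pyGetD (PySem.List.pyGetD s 0 ([], 0)).1 (-1) 0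
  let trunc := match s.findIdx? (fun x => PySem.List.pyGetD x.1 (-1) 0 != t0) with
               | some i => s.take i
               | none => s
  -- filter 2: score table
  let score := infoOrig.foldl (fun sc v =>
      (PySem.List.pyRange 0 (trunc.length : Int) 1).foldl (fun sc j =>
        if (PySem.List.pyGetD trunc j ([], (0 : Int))).1.contains v
        then PySem.List.pySetD sc j (PySem.List.pyGetD sc j 0 + 1) else sc) sc)
    (List.replicate trunc.length (0 : Int))
  match PySem.List.max? score (fun x => x) with
  | none => ""   -- Python: max([]) raises ValueError (strings = [], excluded by Pre_)
  | some m =>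
    match PySem.List.index? score m with
    | none => ""
    | some j => PySem.List.pyGetD keep (PySem.List.pyGetD trunc (j : Int) ([], 0)).2 ""

-- ===== PORT B =====
def bestTranslate_alt (strings : List String) (original : String) (isRoman : Bool) : String :=
  let keep := strings
  let strs := strings.map pvOnlyLower
  let orig := pvOnlyLower original
  let pts := strs.map (fun s => pvSplitPoints s isRoman)
  let opts := pvSplitPoints orig isRoman
  let ot := PySem.List.pyGetD opts (-1) 0
  match PySem.List.min? pts (fun p => |PySem.List.pyGetD p (-1) 0 - ot|) with
  | none => ""   -- Python: min() of an empty generator raises (strings = [], excluded by Pre_)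
  | some pmin =>
    let dstar := |PySem.List.pyGetD pmin (-1) 0 - ot|
    let tier := (PySem.List.enumerate pts 0).filterMap (fun q =>
        if |PySem.List.pyGetD q.2 (-1) 0 - ot| = dstar then some (q.2, q.1) else none)
    let target := PySem.List.pyGetD (PySem.List.pyGetD tier 0 ([], 0)).1 (-1) 0
    let survivors := tier.takeWhile (fun x => PySem.List.pyGetD x.1 (-1) 0 == target)
    match survivors with
    | [] => ""   -- unreachable when tier ≠ [] (its head passes the test)
    | (p0, i0) :: rest =>
      let best0 := (opts.map (fun x => if p0.contains x then (1 : Int) else 0)).sum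
      let r := rest.foldl (fun (st : Int × Int) t =>
          let sct := (opts.map (fun x => if t.1.contains x then (1 : Int) else 0)).sum
          if sct > st.1 then (sct, t.2) else st) (best0, i0)
      PySem.List.pyGetD keep r.2 ""

-- ===== PRECONDITION & SPEC =====
def pvHasWord (s : String) : Bool :=
  s.toList.any (fun c => !(PySem.Chars.isspace c || pvPunct.contains c))

-- Pre_ excludes exactly the inputs where the Python A raises: an empty candidate list
-- (max of an empty score list, ValueError) and sentences that are empty after removing
-- punctuation and whitespace (their split-point list is [], so [-1] raises IndexError).
def Pre_bestTranslate (strings : List String) (original : String) (isRoman : Bool) : Prop :=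
  strings ≠ [] ∧ pvHasWord original = true ∧ ∀ s ∈ strings, pvHasWord s = true

instance (strings : List String) (original : String) (isRoman : Bool) :
    Decidable (Pre_bestTranslate strings original isRoman) := by
  unfold Pre_bestTranslate; infer_instance

def pvWitness_bestTranslate : List String × String × Bool := (["hello there", "hi"], "an weok", false)

def Spec_bestTranslate (strings : List String) (original : String) (isRoman : Bool) (out : String) : Prop := out = bestTranslate_alt strings original isRoman
instance (strings : List String) (original : String) (isRoman : Bool) (out : String) : Decidable (Spec_bestTranslate strings original isRoman out) := by unfold Spec_bestTranslate; infer_instance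

-- ===== CLAIM (what is proved, stated in full; the proofs are below) =====
def Claim_equal_bestTranslate : Prop := ∀ (strings : List String) (original : String) (isRoman : Bool), Dom_bestTranslate strings original isRoman → Pre_bestTranslate strings original isRoman → Spec_bestTranslate strings original isRoman (bestTranslate strings original isRoman)

-- ===== LEMMAS AND PROOFS =====

-- L1: enumerate of a map
theorem pv_enumerate_map {α β : Type} (f : α → β) (xs : List α) (s : Int) :
    PySem.List.enumerate (xs.map f) s = (PySem.List.enumerate xs s).map (fun p => (p.1, f p.2)) := by
  induction xs generalizing s with
  | nil => simp [PySem.List.enumerate_nil]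
  | cons x t ih => simp [PySem.List.enumerate_cons, ih]

-- L2: a guarded filterMap is filter of map
theorem pv_filterMap_ite {α β : Type} (g : α → β) (p : β → Prop) [DecidablePred p] (l : List α) :
    l.filterMap (fun a => if p (g a) then some (g a) else none)
      = (l.map g).filter (fun b => decide (p b)) := by
  induction l with
  | nil => rfl
  | cons x t ih =>
    by_cases h : p (g x) <;> simp [h, ih]

-- L7: the for/break truncation is takeWhile
theorem pv_take_findIdx? {α : Type} (p : α → Bool) (l : List α) :
    (match l.findIdx? p with | some i => l.take i | none => l)
      = l.takeWhile (fun x => !p x) := by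
  induction l with
  | nil => rfl
  | cons x t ih =>
    cases hp : p x with
    | true => simp [List.findIdx?_cons, hp]
    | false =>
      simp only [List.findIdx?_cons, hp, List.takeWhile_cons, Bool.not_false, if_true]
      cases h : t.findIdx? p with
      | none => simpa [h] using ih
      | some i => simpa [h] using ih

-- insertBy into a key-sorted list keeps it key-sorted
theorem pv_insertBy_pairwise {α : Type} (key : α → Int) (x : α) (acc : List α)
    (h : acc.Pairwise (fun a b => key a ≤ key b)) :
    (PySem.List.insertBy (fun a b => decide (key a < key b)) x acc).Pairwise
      (fun a b => key a ≤ key b) := by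
  induction acc with
  | nil => simp [PySem.List.insertBy]
  | cons y ys ih =>
    rcases List.pairwise_cons.mp h with ⟨hy, hys⟩
    by_cases hxy : key x < key y
    · simp only [PySem.List.insertBy, hxy, decide_true, if_true]
      refine List.pairwise_cons.mpr ⟨?_, h⟩
      intro z hz
      rcases List.mem_cons.mp hz with hz | hz
      · subst hz; omega
      · have := hy z hz; omega
    · simp only [PySem.List.insertBy, hxy, decide_false]
      refine List.pairwise_cons.mpr ⟨?_, ih hys⟩
      intro z hz
      rcases (PySem.List.mem_insertBy _ _ _ _).mp hz with hz | hz
      · subst hz; omega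
      · exact hy z hz

-- filtering one key class through insertBy: equal keys go behind (stability step)
theorem pv_filter_insertBy {α : Type} (key : α → Int) (c : Int) (x : α) (acc : List α)
    (h : acc.Pairwise (fun a b => key a ≤ key b)) :
    (PySem.List.insertBy (fun a b => decide (key a < key b)) x acc).filter
        (fun a => decide (key a = c))
      = if key x = c then acc.filter (fun a => decide (key a = c)) ++ [x]
        else acc.filter (fun a => decide (key a = c)) := by
  induction acc with
  | nil => simp [PySem.List.insertBy]; split <;> simp_all
  | cons y ys ih =>
    rcases List.pairwise_cons.mp h with ⟨hy, hys⟩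
    by_cases hxy : key x < key y
    · simp only [PySem.List.insertBy, hxy, decide_true, if_true]
      by_cases hxc : key x = c
      · have hyne : ¬ (key y = c) := by omega
        have hall : (ys.filter (fun a => decide (key a = c))) = [] := by
          apply List.filter_eq_nil_iff.mpr
          intro a ha
          have := hy a ha
          simp only [decide_eq_true_eq]
          omega
        simp [hxc, hyne, hall]
      · simp [List.filter_cons, hxc]
    · simp only [PySem.List.insertBy, hxy, decide_false]
      by_cases hyc : key y = c <;> by_cases hxc : key x = c <;>
        simp [hyc, hxc, ih hys]

-- stability of the PySem insertion sort on one key class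
theorem pv_filter_sorted {α : Type} (key : α → Int) (c : Int) (xs : List α) :
    (PySem.List.sorted xs key false).filter (fun a => decide (key a = c))
      = xs.filter (fun a => decide (key a = c)) := by
  rw [PySem.List.sorted_eq_foldl_insertBy]
  suffices h : ∀ (l acc : List α), acc.Pairwise (fun a b => key a ≤ key b) →
      (l.foldl (fun acc x => PySem.List.insertBy (fun a b => decide (key a < key b)) x acc) acc).filter
          (fun a => decide (key a = c))
        = acc.filter (fun a => decide (key a = c)) ++ l.filter (fun a => decide (key a = c)) by
    simpa using h xs [] (by simp)
  intro l
  induction l with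
  | nil => intro acc h; simp
  | cons x t ih =>
    intro acc h
    simp only [List.foldl_cons]
    rw [ih _ (pv_insertBy_pairwise key x acc h), pv_filter_insertBy key c x acc h]
    by_cases hxc : key x = c <;> simp [hxc]

-- on a key-sorted list whose keys are all ≥ m, the key-m class is an initial run
theorem pv_takeWhile_filter_min {α : Type} (key : α → Int) (m : Int) (l : List α)
    (hs : l.Pairwise (fun a b => key a ≤ key b)) (hmin : ∀ x ∈ l, m ≤ key x) :
    l.takeWhile (fun a => decide (key a = m)) = l.filter (fun a => decide (key a = m)) := by
  induction l with
  | nil => rfl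
  | cons x t ih =>
    rcases List.pairwise_cons.mp hs with ⟨hx, ht⟩
    by_cases hxc : key x = m
    · simp only [List.takeWhile_cons, List.filter_cons, hxc, decide_true, if_true]
      rw [ih ht (fun y hy => hmin y (List.mem_cons_of_mem _ hy))]
    · have hmx : m < key x := by
        have := hmin x (List.mem_cons_self) ; omega
      have hall : (t.filter (fun a => decide (key a = m))) = [] := by
        apply List.filter_eq_nil_iff.mpr
        intro a ha
        have := hx a ha
        simp only [decide_eq_true_eq]
        omega
      simp [hxc, hall]

-- the score-table inner loop updates a mapped list pointwise
theorem pv_score_inner (ts : List (List Int × Int)) (v : Int) (g : List Int × Int → Int) :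
    (PySem.List.pyRange 0 (ts.length : Int) 1).foldl
      (fun sc j => if (PySem.List.pyGetD ts j ([], (0 : Int))).1.contains v
        then PySem.List.pySetD sc j (PySem.List.pyGetD sc j 0 + 1) else sc) (ts.map g)
    = ts.map (fun x => g x + (if x.1.contains v then 1 else 0)) := by
  set h' : List Int × Int → Int := fun x => g x + (if x.1.contains v then 1 else 0) with hh'
  have key : ∀ n : Nat, n ≤ ts.length →
      (PySem.List.pyRange 0 (n : Int) 1).foldl
        (fun sc j => if (PySem.List.pyGetD ts j ([], (0 : Int))).1.contains v
          then PySem.List.pySetD sc j (PySem.List.pyGetD sc j 0 + 1) else sc) (ts.map g)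
      = (ts.map h').take n ++ (ts.map g).drop n := by
    intro n
    induction n with
    | zero => intro _; simp [PySem.List.pyRange_one_eq_nil (le_refl 0)]
    | succ n ih =>
      intro hn
      have hn' : n ≤ ts.length := by omega
      have hlt : n < ts.length := by omega
      have hcast : ((n + 1 : Nat) : Int) = (n : Int) + 1 := by push_cast; ring
      rw [hcast, PySem.List.pyRange_one_succ_right (by positivity), List.foldl_append, ih hn']
      set Rn := (ts.map h').take n ++ (ts.map g).drop n with hRn
      have hRlen : Rn.length = ts.length := by
        simp [hRn]; omega
      have hRget : ∀ (i : Nat) (hi : i < ts.length),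
          Rn[i]'(by omega) = if i < n then h' (ts[i]'hi) else g (ts[i]'hi) := by
        intro i hi
        by_cases hin : i < n
        · rw [List.getElem_append_left (by simp; omega)]
          simp [hin]
        · rw [List.getElem_append_right (by simp; omega)]
          simp only [List.length_take, List.length_map, List.getElem_drop, List.getElem_map]
          have e : n + (i - min n ts.length) = i := by omega
          simp [e, hin]
      have hts : PySem.List.pyGetD ts ((n : Nat) : Int) ([], (0 : Int)) = ts[n]'hlt := by
        rw [PySem.List.pyGetD_natCast]
        exact List.getD_eq_getElem _ _ hlt
      have hscn : PySem.List.pyGetD Rn ((n : Nat) : Int) 0 = g (ts[n]'hlt) := by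
        rw [PySem.List.pyGetD_natCast, List.getD_eq_getElem _ _ (by omega), hRget n hlt]
        simp
      have hgoal : ∀ (L : List Int), L = Rn.set n (h' (ts[n]'hlt)) →
          L = (ts.map h').take (n + 1) ++ (ts.map g).drop (n + 1) := by
        intro L hL
        subst hL
        apply List.ext_getElem
        · simp; omega
        · intro i hi1 hi2
          have hi : i < ts.length := by simpa [hRlen] using hi1
          rw [List.getElem_set]
          by_cases hin : i = n
          · subst hin
            have hlen1 : i < (List.take (i + 1) (List.map h' ts)).length := by
              simp only [List.length_take, List.length_map]; omega
            rw [if_pos rfl, List.getElem_append_left hlen1]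
            simp
          · rw [if_neg (fun hh => hin hh.symm), hRget i hi]
            by_cases hile : i < n + 1
            · have hin' : i < n := by omega
              have hlen1 : i < (List.take (n + 1) (List.map h' ts)).length := by
                simp only [List.length_take, List.length_map]; omega
              rw [if_pos hin', List.getElem_append_left hlen1]
              simp
            · have hlen1 : (List.take (n + 1) (List.map h' ts)).length ≤ i := by
                simp only [List.length_take, List.length_map]; omega
              rw [if_neg (by omega), List.getElem_append_right hlen1]
              simp only [List.length_take, List.length_map, List.getElem_drop, List.getElem_map]
              have e : n + 1 + (i - min (n + 1) ts.length) = i := by omega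
              simp [e]
      simp only [List.foldl_cons, List.foldl_nil]
      by_cases hc : (ts[n]'hlt).1.contains v
      · simp only [hts, hc, if_true]
        apply hgoal
        rw [PySem.List.pySetD_natCast, hscn]
        congr 1
        simp only [hh']
        rw [if_pos hc]
      · rw [hts, if_neg hc]
        apply hgoal
        apply List.ext_getElem
        · simp
        · intro i hi1 hi2
          rw [List.getElem_set]
          by_cases hin : n = i
          · subst hin
            rw [if_pos rfl, hRget n hlt, if_neg (by omega)]
            simp only [hh']
            rw [if_neg hc]
            simp
          · rw [if_neg hin]
  have := key ts.length (le_refl _)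
  rw [List.take_of_length_le (by simp), List.drop_eq_nil_of_le (by simp), List.append_nil] at this
  exact this

theorem pv_score_outer (ts : List (List Int × Int)) (opts : List Int) (g : List Int × Int → Int)
    (hinner : ∀ (v : Int) (g : List Int × Int → Int),
      (PySem.List.pyRange 0 (ts.length : Int) 1).foldl
        (fun sc j => if (PySem.List.pyGetD ts j ([], (0 : Int))).1.contains v
          then PySem.List.pySetD sc j (PySem.List.pyGetD sc j 0 + 1) else sc) (ts.map g)
      = ts.map (fun x => g x + (if x.1.contains v then 1 else 0))) :
    opts.foldl (fun sc v =>
      (PySem.List.pyRange 0 (ts.length : Int) 1).foldl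
        (fun sc j => if (PySem.List.pyGetD ts j ([], (0 : Int))).1.contains v
          then PySem.List.pySetD sc j (PySem.List.pyGetD sc j 0 + 1) else sc) sc) (ts.map g)
    = ts.map (fun x => g x + (opts.map (fun v => if x.1.contains v then (1 : Int) else 0)).sum) := by
  induction opts generalizing g with
  | nil => simp
  | cons v opts ih =>
    simp only [List.foldl_cons]
    rw [hinner v g, ih]
    apply List.map_congr_left
    intro x _
    simp only [List.map_cons, List.sum_cons]
    ring

def pvFirstArg (f : List Int × Int → Int) : List Int × Int → List (List Int × Int) → List Int × Int
  | x, [] => x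
  | x, z :: t => if f z > f x then pvFirstArg f z t else pvFirstArg f x t

theorem pv_fold_firstArg (f : List Int × Int → Int) (t : List (List Int × Int))
    (x : List Int × Int) :
    t.foldl (fun (st : Int × Int) z =>
        if f z > st.1 then (f z, z.2) else st) (f x, x.2)
    = (f (pvFirstArg f x t), (pvFirstArg f x t).2) := by
  induction t generalizing x with
  | nil => rfl
  | cons z t ih =>
    simp only [List.foldl_cons, pvFirstArg]
    by_cases h : f z > f x
    · rw [if_pos h, if_pos h]
      exact ih z
    · rw [if_neg h, if_neg h]
      exact ih x

theorem pv_firstArg_spec (f : List Int × Int → Int) (t : List (List Int × Int))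
    (x : List Int × Int) :
    ∃ (j : Nat) (hj : j < (x :: t).length), pvFirstArg f x t = (x :: t)[j]
      ∧ (∀ (i : Nat) (hi : i < (x :: t).length), f ((x :: t)[i]) ≤ f ((x :: t)[j]))
      ∧ (∀ (i : Nat), i < j → ∀ (hi : i < (x :: t).length), f ((x :: t)[i]) < f ((x :: t)[j])) := by
  induction t generalizing x with
  | nil =>
    refine ⟨0, by simp, rfl, ?_, ?_⟩
    · intro i hi
      have h0 : i = 0 := by simp at hi; omega
      subst h0
      simp
    · intro i hi
      omega
  | cons z t ih =>
    by_cases h : f z > f x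
    · obtain ⟨j, hj, heq, hle, hlt⟩ := ih z
      refine ⟨j + 1, by simpa using hj, ?_, ?_, ?_⟩
      · simpa [pvFirstArg, h] using heq
      · intro i hi
        match i with
        | 0 =>
          have := hle 0 (by simp)
          simp only [List.getElem_cons_zero, List.getElem_cons_succ] at *
          omega
        | i + 1 =>
          have := hle i (by simpa using hi)
          simpa using this
      · intro i hi hi2
        match i with
        | 0 =>
          have := hle 0 (by simp)
          simp only [List.getElem_cons_zero, List.getElem_cons_succ] at *
          omega
        | i + 1 =>
          have := hlt i (by omega) (by simpa using hi2)
          simpa using this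
    · obtain ⟨j, hj, heq, hle, hlt⟩ := ih x
      match j with
      | 0 =>
        refine ⟨0, by simp, ?_, ?_, ?_⟩
        · simpa [pvFirstArg, h] using heq
        · intro i hi
          match i with
          | 0 => simp
          | 1 =>
            simp only [List.getElem_cons_zero, List.getElem_cons_succ]
            omega
          | i + 2 =>
            have := hle (i + 1) (by simpa using hi)
            simp only [List.getElem_cons_zero, List.getElem_cons_succ] at *
            omega
        · intro i hi
          omega
      | j + 1 =>
        refine ⟨j + 2, by simpa using hj, ?_, ?_, ?_⟩
        · simpa [pvFirstArg, h] using heq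
        · intro i hi
          match i with
          | 0 =>
            have := hle 0 (by simp)
            simpa using this
          | 1 =>
            have := hle 0 (by simp)
            simp only [List.getElem_cons_zero, List.getElem_cons_succ] at *
            omega
          | i + 2 =>
            have := hle (i + 1) (by simpa using hi)
            simpa using this
        · intro i hi hi2
          match i with
          | 0 =>
            have := hlt 0 (by omega) (by simp)
            simpa using this
          | 1 =>
            have := hlt 0 (by omega) (by simp)
            simp only [List.getElem_cons_zero, List.getElem_cons_succ] at *
            omega
          | i + 2 =>
            have := hlt (i + 1) (by omega) (by simpa using hi2)
            simpa using this

theorem pv_filter2_pick (f : List Int × Int → Int) (x0 : List Int × Int)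
    (rest : List (List Int × Int)) (m : Int) (j : Nat)
    (hmax : PySem.List.max? ((x0 :: rest).map f) (fun y => y) = some m)
    (hidx : PySem.List.index? ((x0 :: rest).map f) m = some j) :
    ∃ (hj : j < (x0 :: rest).length), (x0 :: rest)[j] = pvFirstArg f x0 rest := by
  obtain ⟨hk, hjm, hjne⟩ := PySem.List.getElem_of_index?_eq_some hidx
  have hklen : j < (x0 :: rest).length := by simpa using hk
  have hje : f ((x0 :: rest)[j]'hklen) = m := by
    rw [← hjm, List.getElem_map]
  have hallle : ∀ (i : Nat) (hi : i < (x0 :: rest).length), f ((x0 :: rest)[i]'hi) ≤ m := by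
    intro i hi
    apply PySem.List.max?_isMax hmax
    exact List.mem_map_of_mem (List.getElem_mem hi)
  have hstrict : ∀ (i : Nat), i < j → ∀ (hi : i < (x0 :: rest).length),
      f ((x0 :: rest)[i]'hi) < m := by
    intro i hilt hi
    have hne := hjne i (by omega)
    have : f ((x0 :: rest)[i]'hi) ≠ m := by
      intro hcon
      apply hne
      rw [List.getElem_map]
      exact hcon
    have := hallle i hi
    omega
  obtain ⟨j2, hj2, heq2, hle2, hlt2⟩ := pv_firstArg_spec f rest x0
  have hjeq : j = j2 := by
    by_contra hne
    rcases Nat.lt_or_ge j j2 with hlt' | hge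
    · have h1 := hlt2 j hlt' hklen
      have h2 := hallle j2 hj2
      omega
    · have hlt' : j2 < j := by omega
      have h1 := hstrict j2 hlt' hj2
      have h2 := hle2 j hklen
      omega
  refine ⟨hklen, ?_⟩
  subst hjeq
  exact heq2.symm

set_option maxRecDepth 4096 in
set_option maxHeartbeats 1000000 in
theorem pv_core (keep : List String) (pts : List (List Int)) (opts : List Int)
    (hne : pts ≠ []) :
    (let infoStr := (PySem.List.enumerate pts 0).map (fun q => (q.2, q.1))
     let ot := PySem.List.pyGetD opts (-1) 0
     let s := PySem.List.sorted infoStr (fun x => |PySem.List.pyGetD x.1 (-1) 0 - ot|) false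
     let t0 := PySem.List.pyGetD (PySem.List.pyGetD s 0 ([], 0)).1 (-1) 0
     let trunc := match s.findIdx? (fun x => PySem.List.pyGetD x.1 (-1) 0 != t0) with
                  | some i => s.take i
                  | none => s
     let score := opts.foldl (fun sc v =>
         (PySem.List.pyRange 0 (trunc.length : Int) 1).foldl (fun sc j =>
           if (PySem.List.pyGetD trunc j ([], (0 : Int))).1.contains v
           then PySem.List.pySetD sc j (PySem.List.pyGetD sc j 0 + 1) else sc) sc)
       (List.replicate trunc.length (0 : Int))
     match PySem.List.max? score (fun x => x) with
     | none => ""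
     | some m =>
       match PySem.List.index? score m with
       | none => ""
       | some j => PySem.List.pyGetD keep (PySem.List.pyGetD trunc (j : Int) ([], 0)).2 "")
    = (let ot := PySem.List.pyGetD opts (-1) 0
       match PySem.List.min? pts (fun p => |PySem.List.pyGetD p (-1) 0 - ot|) with
       | none => ""
       | some pmin =>
         let dstar := |PySem.List.pyGetD pmin (-1) 0 - ot|
         let tier := (PySem.List.enumerate pts 0).filterMap (fun q =>
             if |PySem.List.pyGetD q.2 (-1) 0 - ot| = dstar then some (q.2, q.1) else none)
         let target := PySem.List.pyGetD (PySem.List.pyGetD tier 0 ([], 0)).1 (-1) 0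
         let survivors := tier.takeWhile (fun x => PySem.List.pyGetD x.1 (-1) 0 == target)
         match survivors with
         | [] => ""
         | (p0, i0) :: rest =>
           let best0 := (opts.map (fun x => if p0.contains x then (1 : Int) else 0)).sum
           let r := rest.foldl (fun (st : Int × Int) t =>
               let sct := (opts.map (fun x => if t.1.contains x then (1 : Int) else 0)).sum
               if sct > st.1 then (sct, t.2) else st) (best0, i0)
           PySem.List.pyGetD keep r.2 "") := by
  dsimp only
  set ot := PySem.List.pyGetD opts (-1) 0 with hot
  set infoStr := (PySem.List.enumerate pts 0).map (fun q : Int × List Int => (q.2, q.1)) with hinfo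
  have hinfo_ne : infoStr ≠ [] := by
    rw [hinfo]
    intro h
    apply hne
    have := congrArg List.length h
    simpa [PySem.List.length_enumerate] using this
  have hfst : infoStr.map (fun x => x.1) = pts := by
    rw [hinfo, List.map_map]
    have : ((fun x : List Int × Int => x.1) ∘ (fun q : Int × List Int => (q.2, q.1)))
        = (fun q : Int × List Int => q.2) := by
      funext q; rfl
    rw [this, PySem.List.map_snd_enumerate]
  clear_value infoStr
  set srt := PySem.List.sorted infoStr (fun x => |PySem.List.pyGetD x.1 (-1) 0 - ot|) false with hsrt
  clear_value srt
  -- B: resolve the min? match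
  obtain ⟨pmin, hminq⟩ : ∃ pmin, PySem.List.min? pts
      (fun p => |PySem.List.pyGetD p (-1) 0 - ot|) = some pmin := by
    cases h : PySem.List.min? pts (fun p => |PySem.List.pyGetD p (-1) 0 - ot|) with
    | none => exact absurd ((PySem.List.min?_eq_none_iff _ _).mp h) hne
    | some p => exact ⟨p, rfl⟩
  rw [hminq]
  dsimp only
  set dstar := |PySem.List.pyGetD pmin (-1) 0 - ot| with hdstar
  have hminle : ∀ p ∈ pts, dstar ≤ |PySem.List.pyGetD p (-1) 0 - ot| := by
    intro p hp
    exact PySem.List.min?_isMin hminq p hp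
  have hmininfo : ∀ x ∈ infoStr, dstar ≤ |PySem.List.pyGetD x.1 (-1) 0 - ot| := by
    intro x hx
    apply hminle
    rw [← hfst]
    exact List.mem_map_of_mem hx
  -- the sorted list is nonempty; name its head
  have hsrt_ne : srt ≠ [] := by
    rw [hsrt]
    simpa [PySem.List.sorted_eq_nil_iff] using hinfo_ne
  obtain ⟨⟨m0p, m0i⟩, t, hsm⟩ : ∃ m0 t, srt = m0 :: t := by
    cases h : srt with
    | nil => exact absurd h hsrt_ne
    | cons a b => exact ⟨a, b, rfl⟩
  have hm0_mem : ((m0p, m0i) : List Int × Int) ∈ infoStr := by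
    have : ((m0p, m0i) : List Int × Int) ∈ srt := by rw [hsm]; exact List.mem_cons_self
    rw [hsrt] at this
    exact (PySem.List.mem_sorted _ _ _ _).mp this
  have hkm0 : |PySem.List.pyGetD m0p (-1) 0 - ot| = dstar := by
    apply le_antisymm
    · obtain ⟨x, hxmem, hx1⟩ : ∃ x ∈ infoStr, x.1 = pmin := by
        have hpm : pmin ∈ pts := PySem.List.min?_mem hminq
        rw [← hfst] at hpm
        obtain ⟨x, hx, hx1⟩ := List.mem_map.mp hpm
        exact ⟨x, hx, hx1⟩
      have hsorted_eq : PySem.List.sorted infoStr (fun x => |PySem.List.pyGetD x.1 (-1) 0 - ot|)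
          = ((m0p, m0i) : List Int × Int) :: t := by rw [← hsrt]; exact hsm
      have hhead := PySem.List.key_head_sorted_le infoStr
        (fun x => |PySem.List.pyGetD x.1 (-1) 0 - ot|) hsorted_eq x hxmem
      simpa [hx1, ← hdstar] using hhead
    · exact hmininfo ((m0p, m0i) : List Int × Int) hm0_mem
  -- A: head value t0
  have hhead0 : PySem.List.pyGetD srt 0 ([], 0) = ((m0p, m0i) : List Int × Int) := by
    rw [hsm, PySem.List.pyGetD_ofNat']
    rfl
  rw [hhead0]
  dsimp only
  set t0 := PySem.List.pyGetD m0p (-1) 0 with ht0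
  -- A: the truncation loop is a takeWhile
  rw [pv_take_findIdx? (fun x : List Int × Int => PySem.List.pyGetD x.1 (-1) 0 != t0) srt]
  have hQ : (fun x : List Int × Int => !(PySem.List.pyGetD x.1 (-1) 0 != t0))
      = (fun x : List Int × Int => PySem.List.pyGetD x.1 (-1) 0 == t0) := by
    funext x
    simp [bne]
  rw [hQ]
  -- B: the tier is a filter of infoStr
  have htier : (PySem.List.enumerate pts 0).filterMap (fun q =>
        if |PySem.List.pyGetD q.2 (-1) 0 - ot| = dstar then some (q.2, q.1) else none)
      = infoStr.filter (fun b => decide (|PySem.List.pyGetD b.1 (-1) 0 - ot| = dstar)) := by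
    rw [hinfo]
    have h := pv_filterMap_ite (fun q : Int × List Int => (q.2, q.1))
      (fun b : List Int × Int => |PySem.List.pyGetD b.1 (-1) 0 - ot| = dstar)
      (PySem.List.enumerate pts 0)
    simpa only [] using h
  rw [htier]
  -- stability + sortedness: the filter is an initial run of srt
  have hstab : srt.filter (fun b => decide (|PySem.List.pyGetD b.1 (-1) 0 - ot| = dstar))
      = infoStr.filter (fun b => decide (|PySem.List.pyGetD b.1 (-1) 0 - ot| = dstar)) := by
    rw [hsrt]
    have h := pv_filter_sorted (fun x => |PySem.List.pyGetD x.1 (-1) 0 - ot|) dstar infoStr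
    simpa only [] using h
  have hpair : srt.Pairwise (fun a b =>
      |PySem.List.pyGetD a.1 (-1) 0 - ot| ≤ |PySem.List.pyGetD b.1 (-1) 0 - ot|) := by
    rw [hsrt]
    exact PySem.List.sorted_pairwise _ _
  have hminsrt : ∀ x ∈ srt, dstar ≤ |PySem.List.pyGetD x.1 (-1) 0 - ot| := by
    intro x hx
    rw [hsrt] at hx
    exact hmininfo x ((PySem.List.mem_sorted _ _ _ _).mp hx)
  have hrun : srt.takeWhile (fun b => decide (|PySem.List.pyGetD b.1 (-1) 0 - ot| = dstar))
      = srt.filter (fun b => decide (|PySem.List.pyGetD b.1 (-1) 0 - ot| = dstar)) := by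
    have h := pv_takeWhile_filter_min (fun x : List Int × Int => |PySem.List.pyGetD x.1 (-1) 0 - ot|)
      dstar srt hpair hminsrt
    simpa only [] using h
  -- the filter starts with the head of srt
  have hfilter_cons : infoStr.filter (fun b => decide (|PySem.List.pyGetD b.1 (-1) 0 - ot| = dstar))
      = ((m0p, m0i) : List Int × Int) :: t.filter (fun b => decide (|PySem.List.pyGetD b.1 (-1) 0 - ot| = dstar)) := by
    rw [← hstab, hsm, List.filter_cons, ← ht0]
    simp [hkm0]
  rw [hfilter_cons]
  -- B: target equals t0
  have htarget : PySem.List.pyGetD (((m0p, m0i) : List Int × Int) ::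
        t.filter (fun b => decide (|PySem.List.pyGetD b.1 (-1) 0 - ot| = dstar))) 0 ([], 0)
      = ((m0p, m0i) : List Int × Int) := by
    rw [PySem.List.pyGetD_ofNat']
    rfl
  rw [htarget]
  -- A's truncation equals B's survivors
  have himp : ∀ x : List Int × Int, (PySem.List.pyGetD x.1 (-1) 0 == t0) = true →
      decide (|PySem.List.pyGetD x.1 (-1) 0 - ot| = dstar) = true := by
    intro x hx
    have hxv : PySem.List.pyGetD x.1 (-1) 0 = t0 := by
      exact of_decide_eq_true (by simpa using hx)
    simp [hxv, hkm0]
  have htrunc : srt.takeWhile (fun x : List Int × Int => PySem.List.pyGetD x.1 (-1) 0 == t0)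
      = (((m0p, m0i) : List Int × Int) ::
          t.filter (fun b => decide (|PySem.List.pyGetD b.1 (-1) 0 - ot| = dstar))).takeWhile
        (fun x : List Int × Int => PySem.List.pyGetD x.1 (-1) 0 == t0) := by
    rw [← hfilter_cons, ← hstab, ← hrun, List.takeWhile_takeWhile]
    congr 1
    funext a
    cases ha : (PySem.List.pyGetD a.1 (-1) 0 == t0) with
    | true => simp [himp a ha]
    | false => simp

  rw [htrunc]
  -- name the surviving list; it is nonempty with head (m0p, m0i)
  have hQm0 : ((PySem.List.pyGetD (((m0p, m0i) : List Int × Int)).1 (-1) 0 == t0)) = true := by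
    simp [ht0]
  rw [List.takeWhile_cons, hQm0, if_pos rfl]
  set rest := (t.filter (fun b => decide (|PySem.List.pyGetD b.1 (-1) 0 - ot| = dstar))).takeWhile
    (fun x : List Int × Int => PySem.List.pyGetD x.1 (-1) 0 == t0) with hrest
  clear_value rest
  -- the score table is a map over the survivors
  have hrep : List.replicate ((((m0p, m0i) : List Int × Int) :: rest)).length (0 : Int)
      = (((m0p, m0i) : List Int × Int) :: rest).map (fun _ => (0 : Int)) := by
    simp [List.replicate_succ]
  rw [hrep, pv_score_outer (((m0p, m0i) : List Int × Int) :: rest) opts (fun _ => (0 : Int))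
    (pv_score_inner (((m0p, m0i) : List Int × Int) :: rest))]
  have hF : (((m0p, m0i) : List Int × Int) :: rest).map (fun x => (fun _ => (0 : Int)) x +
        (opts.map (fun v => if x.1.contains v then (1 : Int) else 0)).sum)
      = (((m0p, m0i) : List Int × Int) :: rest).map
          (fun x => (opts.map (fun v => if x.1.contains v then (1 : Int) else 0)).sum) := by
    apply List.map_congr_left
    intro x _
    simp
  rw [hF]
  -- resolve A's max?/index? matches
  obtain ⟨m, hm⟩ : ∃ m, PySem.List.max?
      ((((m0p, m0i) : List Int × Int) :: rest).map
        (fun x => (opts.map (fun v => if x.1.contains v then (1 : Int) else 0)).sum))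
      (fun x => x) = some m := by
    cases h : PySem.List.max?
        ((((m0p, m0i) : List Int × Int) :: rest).map
          (fun x => (opts.map (fun v => if x.1.contains v then (1 : Int) else 0)).sum))
        (fun x => x) with
    | none =>
      exfalso
      have := (PySem.List.max?_eq_none_iff _ _).mp h
      simp at this
    | some m => exact ⟨m, rfl⟩
  obtain ⟨j, hj⟩ : ∃ j, PySem.List.index?
      ((((m0p, m0i) : List Int × Int) :: rest).map
        (fun x => (opts.map (fun v => if x.1.contains v then (1 : Int) else 0)).sum)) m
      = some j := by
    have hmem := PySem.List.max?_mem hm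
    have hsome := (PySem.List.index?_isSome_iff _ m).mpr hmem
    cases h : PySem.List.index?
        ((((m0p, m0i) : List Int × Int) :: rest).map
          (fun x => (opts.map (fun v => if x.1.contains v then (1 : Int) else 0)).sum)) m with
    | none => rw [h] at hsome; simp at hsome
    | some j => exact ⟨j, rfl⟩
  rw [hm]
  dsimp only
  rw [hj]
  dsimp only
  -- both sides pick the same element
  obtain ⟨hjlt, helem⟩ := pv_filter2_pick
    (fun x => (opts.map (fun v => if x.1.contains v then (1 : Int) else 0)).sum)
    ((m0p, m0i) : List Int × Int) rest m j hm hj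
  have hAix : PySem.List.pyGetD (((m0p, m0i) : List Int × Int) :: rest) (j : Int) ([], 0)
      = ((((m0p, m0i) : List Int × Int) :: rest))[j]'hjlt := by
    rw [PySem.List.pyGetD_natCast]
    exact List.getD_eq_getElem _ _ hjlt
  rw [hAix]
  rw [pv_fold_firstArg (fun x => (opts.map (fun v => if x.1.contains v then (1 : Int) else 0)).sum)
    rest ((m0p, m0i) : List Int × Int)]
  rw [← helem]

theorem pv_enum_map_swap (f : String → List Int) (xs : List String) :
    (PySem.List.enumerate (xs.map f) 0).map (fun q : Int × List Int => (q.2, q.1))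
      = (PySem.List.enumerate xs 0).map (fun p => (f p.2, p.1)) := by
  rw [pv_enumerate_map, List.map_map]
  rfl

set_option maxRecDepth 16384 in
set_option maxHeartbeats 1000000 in
theorem pv_main (strings : List String) (original : String) (isRoman : Bool)
    (hne : strings ≠ []) :
    (let keep := strings
     let strs := strings.map pvOnlyLower
     let orig := pvOnlyLower original
     let infoStr := (PySem.List.enumerate strs 0).map (fun p => (pvSplitPoints p.2 isRoman, p.1))
     let infoOrig := pvSplitPoints orig isRoman
     let ot := PySem.List.pyGetD infoOrig (-1) 0
     let s := PySem.List.sorted infoStr (fun x => |PySem.List.pyGetD x.1 (-1) 0 - ot|) false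
     let t0 := PySem.List.pyGetD (PySem.List.pyGetD s 0 ([], 0)).1 (-1) 0
     let trunc := match s.findIdx? (fun x => PySem.List.pyGetD x.1 (-1) 0 != t0) with
                  | some i => s.take i
                  | none => s
     let score := infoOrig.foldl (fun sc v =>
         (PySem.List.pyRange 0 (trunc.length : Int) 1).foldl (fun sc j =>
           if (PySem.List.pyGetD trunc j ([], (0 : Int))).1.contains v
           then PySem.List.pySetD sc j (PySem.List.pyGetD sc j 0 + 1) else sc) sc)
       (List.replicate trunc.length (0 : Int))
     match PySem.List.max? score (fun x => x) with
     | none => ""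
     | some m =>
       match PySem.List.index? score m with
       | none => ""
       | some j => PySem.List.pyGetD keep (PySem.List.pyGetD trunc (j : Int) ([], 0)).2 "")
    = (let keep := strings
       let strs := strings.map pvOnlyLower
       let orig := pvOnlyLower original
       let pts := strs.map (fun s => pvSplitPoints s isRoman)
       let opts := pvSplitPoints orig isRoman
       let ot := PySem.List.pyGetD opts (-1) 0
       match PySem.List.min? pts (fun p => |PySem.List.pyGetD p (-1) 0 - ot|) with
       | none => ""
       | some pmin =>
         let dstar := |PySem.List.pyGetD pmin (-1) 0 - ot|
         let tier := (PySem.List.enumerate pts 0).filterMap (fun q =>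
             if |PySem.List.pyGetD q.2 (-1) 0 - ot| = dstar then some (q.2, q.1) else none)
         let target := PySem.List.pyGetD (PySem.List.pyGetD tier 0 ([], 0)).1 (-1) 0
         let survivors := tier.takeWhile (fun x => PySem.List.pyGetD x.1 (-1) 0 == target)
         match survivors with
         | [] => ""
         | (p0, i0) :: rest =>
           let best0 := (opts.map (fun x => if p0.contains x then (1 : Int) else 0)).sum
           let r := rest.foldl (fun (st : Int × Int) t =>
               let sct := (opts.map (fun x => if t.1.contains x then (1 : Int) else 0)).sum
               if sct > st.1 then (sct, t.2) else st) (best0, i0)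
           PySem.List.pyGetD keep r.2 "") := by
  dsimp only
  rw [← pv_enum_map_swap (fun s => pvSplitPoints s isRoman) (strings.map pvOnlyLower)]
  exact pv_core strings ((strings.map pvOnlyLower).map (fun s => pvSplitPoints s isRoman))
    (pvSplitPoints (pvOnlyLower original) isRoman) (by simpa using hne)

-- ===== VERDICT (by name: the statement is the Claim_ definition above) =====
set_option maxRecDepth 16384 in
set_option maxHeartbeats 1000000 in
theorem bestTranslate_spec : Claim_equal_bestTranslate := by
  intro strings original isRoman hdom hpre
  obtain ⟨hne, -, -⟩ := hpre
  unfold Spec_bestTranslate bestTranslate bestTranslate_alt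
  exact pv_main strings original isRoman hne
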